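-- pv_equiv track=rewrite | github.com/lyna1809/R-solution-de-Futoshiki-avec-un-SAT-Solveur | test.py | ijk_to_num_case
-- ===== SOURCE A (Python) =====
-- def ijk_to_num_case (a,b,c,n) :
--     v = 1
--     for i in range (1,n+1) :
--         for j in range (1,n+1) :
--             for k in range (1, n + 1) :
--                 if (a == i and b == j and k == c) :
--                     return v
--                 else :
--                     v += 1
-- ===== SOURCE B (Python) =====
-- def ijk_to_num_case(a, b, c, n):
--     if 1 <= a <= n and 1 <= b <= n and 1 <= c <= n:
--         return (a - 1) * n * n + (b - 1) * n + c
--     return None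
-- ===== Notes on version B (the rewrite author's own statement) =====
-- stated objective: faster
-- what changed: Replaced the O(n^3) triple nested loop counting positions with the closed-form lexicographic index (a-1)*n*n+(b-1)*n+c guarded by a range check (None when any of a,b,c is outside 1..n).
import Mathlib
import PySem

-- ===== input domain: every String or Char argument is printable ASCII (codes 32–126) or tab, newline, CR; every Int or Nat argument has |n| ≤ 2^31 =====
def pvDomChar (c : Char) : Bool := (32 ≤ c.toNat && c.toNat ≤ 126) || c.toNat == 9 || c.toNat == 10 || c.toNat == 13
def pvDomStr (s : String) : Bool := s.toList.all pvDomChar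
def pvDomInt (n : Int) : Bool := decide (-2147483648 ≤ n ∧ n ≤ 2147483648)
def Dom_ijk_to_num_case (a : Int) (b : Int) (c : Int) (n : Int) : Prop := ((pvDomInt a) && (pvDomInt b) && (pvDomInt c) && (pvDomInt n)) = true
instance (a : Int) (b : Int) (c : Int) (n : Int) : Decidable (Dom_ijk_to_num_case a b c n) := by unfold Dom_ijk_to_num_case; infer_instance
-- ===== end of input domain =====

-- B replaces A's O(n^3) position-counting triple loop by the closed-form index with a range check (faster: asymptotic, measured).

-- ===== PORT A =====
-- inner 'for k' loop: returns (some v) on the early return, else (none, final v)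
def pvKLoop (a b c i j : Int) : List Int → Int → Option Int × Int
  | [], v => (none, v)
  | k :: ks, v =>
    if a = i ∧ b = j ∧ k = c then (some v, v) else pvKLoop a b c i j ks (v + 1)

-- middle 'for j' loop
def pvJLoop (a b c n i : Int) : List Int → Int → Option Int × Int
  | [], v => (none, v)
  | j :: js, v =>
    match pvKLoop a b c i j (PySem.List.pyRange 1 (n + 1) 1) v with
    | (some r, v') => (some r, v')
    | (none, v') => pvJLoop a b c n i js v'

-- outer 'for i' loop
def pvILoop (a b c n : Int) : List Int → Int → Option Int × Int
  | [], v => (none, v)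
  | i :: is, v =>
    match pvJLoop a b c n i (PySem.List.pyRange 1 (n + 1) 1) v with
    | (some r, v') => (some r, v')
    | (none, v') => pvILoop a b c n is v'

def ijk_to_num_case (a : Int) (b : Int) (c : Int) (n : Int) : Option Int :=
  (pvILoop a b c n (PySem.List.pyRange 1 (n + 1) 1) 1).1

-- ===== PORT B =====
def ijk_to_num_case_alt (a : Int) (b : Int) (c : Int) (n : Int) : Option Int :=
  if 1 ≤ a ∧ a ≤ n ∧ 1 ≤ b ∧ b ≤ n ∧ 1 ≤ c ∧ c ≤ n then
    some ((a - 1) * n * n + (b - 1) * n + c)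
  else
    none

-- ===== PRECONDITION & SPEC =====
def Spec_ijk_to_num_case (a : Int) (b : Int) (c : Int) (n : Int) (out : Option Int) : Prop := out = ijk_to_num_case_alt a b c n
instance (a : Int) (b : Int) (c : Int) (n : Int) (out : Option Int) : Decidable (Spec_ijk_to_num_case a b c n out) := by unfold Spec_ijk_to_num_case; infer_instance

-- ===== CLAIM (what is proved, stated in full; the proofs are below) =====
def Claim_equal_ijk_to_num_case : Prop := ∀ (a : Int) (b : Int) (c : Int) (n : Int), Dom_ijk_to_num_case a b c n → Spec_ijk_to_num_case a b c n (ijk_to_num_case a b c n)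

-- ===== LEMMAS AND PROOFS =====

lemma pvKLoop_miss (a b c i j v : Int) (l : List Int)
    (h : ∀ k ∈ l, ¬(a = i ∧ b = j ∧ k = c)) :
    pvKLoop a b c i j l v = (none, v + l.length) := by
  induction l generalizing v with
  | nil => simp [pvKLoop]
  | cons k ks ih =>
    have hk : ¬(a = i ∧ b = j ∧ k = c) := h k (List.mem_cons_self)
    rw [pvKLoop, if_neg hk, ih (v + 1) (fun x hx => h x (List.mem_cons_of_mem _ hx))]
    simp only [Prod.mk.injEq, List.length_cons, true_and]
    push_cast; ring

lemma pvKLoop_hit (a b c i j n : Int) (ha : a = i) (hb : b = j)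
    (hc1 : 1 ≤ c) (hc2 : c ≤ n) :
    ∀ (m : ℕ) (lo v : Int), lo ≤ c → (c - lo).toNat = m →
      pvKLoop a b c i j (PySem.List.pyRange lo (n + 1) 1) v
        = (some (v + (c - lo)), v + (c - lo)) := by
  intro m
  induction m with
  | zero =>
    intro lo v hlo hm
    have hcl : c = lo := by omega
    rw [PySem.List.pyRange_one_cons (by omega)]
    rw [pvKLoop, if_pos ⟨ha, hb, hcl.symm⟩]
    simp [hcl]
  | succ m ih =>
    intro lo v hlo hm
    rw [PySem.List.pyRange_one_cons (by omega)]
    rw [pvKLoop, if_neg (by rintro ⟨_, _, rfl⟩; omega)]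
    rw [ih (lo + 1) (v + 1) (by omega) (by omega)]
    simp only [Prod.mk.injEq, Option.some.injEq]
    omega

lemma pvJLoop_miss (a b c n i v : Int) (l : List Int)
    (h : ∀ j ∈ l, ∀ k ∈ PySem.List.pyRange 1 (n + 1) 1, ¬(a = i ∧ b = j ∧ k = c)) :
    pvJLoop a b c n i l v
      = (none, v + (l.length : Int) * ((PySem.List.pyRange 1 (n + 1) 1).length : Int)) := by
  induction l generalizing v with
  | nil => simp [pvJLoop]
  | cons j js ih =>
    rw [pvJLoop, pvKLoop_miss a b c i j v _ (h j List.mem_cons_self)]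
    dsimp only
    rw [ih _ (fun x hx => h x (List.mem_cons_of_mem _ hx))]
    simp only [Prod.mk.injEq, List.length_cons, true_and]
    push_cast; ring

lemma pvJLoop_hit (a b c n i : Int) (ha : a = i)
    (hb1 : 1 ≤ b) (hb2 : b ≤ n) (hc1 : 1 ≤ c) (hc2 : c ≤ n) :
    ∀ (m : ℕ) (lo v : Int), lo ≤ b → (b - lo).toNat = m →
      pvJLoop a b c n i (PySem.List.pyRange lo (n + 1) 1) v
        = (some (v + (b - lo) * n + (c - 1)), v + (b - lo) * n + (c - 1)) := by
  intro m
  induction m with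
  | zero =>
    intro lo v hlo hm
    have hbl : b = lo := by omega
    rw [PySem.List.pyRange_one_cons (by omega)]
    rw [pvJLoop, pvKLoop_hit a b c i lo n ha hbl hc1 hc2 (c - 1).toNat 1 v (by omega) rfl]
    have : b - lo = 0 := by omega
    simp [this]
  | succ m ih =>
    intro lo v hlo hm
    rw [PySem.List.pyRange_one_cons (by omega)]
    rw [pvJLoop, pvKLoop_miss a b c i lo v _ (by rintro k hk ⟨_, rfl, _⟩; omega)]
    dsimp only
    rw [ih (lo + 1) _ (by omega) (by omega)]
    have hlen : ((PySem.List.pyRange 1 (n + 1) 1).length : Int) = n := by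
      rw [PySem.List.length_pyRange_one]; omega
    rw [hlen]
    simp only [Prod.mk.injEq, Option.some.injEq]
    constructor <;> ring

lemma pvILoop_hit (a b c n : Int)
    (ha1 : 1 ≤ a) (ha2 : a ≤ n) (hb1 : 1 ≤ b) (hb2 : b ≤ n) (hc1 : 1 ≤ c) (hc2 : c ≤ n) :
    ∀ (m : ℕ) (lo v : Int), lo ≤ a → (a - lo).toNat = m →
      pvILoop a b c n (PySem.List.pyRange lo (n + 1) 1) v
        = (some (v + (a - lo) * (n * n) + (b - 1) * n + (c - 1)),
           v + (a - lo) * (n * n) + (b - 1) * n + (c - 1)) := by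
  intro m
  induction m with
  | zero =>
    intro lo v hlo hm
    have hal : a = lo := by omega
    rw [PySem.List.pyRange_one_cons (by omega)]
    rw [pvILoop, pvJLoop_hit a b c n lo hal hb1 hb2 hc1 hc2 (b - 1).toNat 1 v (by omega) rfl]
    have : a - lo = 0 := by omega
    simp only [this, zero_mul, add_zero]
  | succ m ih =>
    intro lo v hlo hm
    rw [PySem.List.pyRange_one_cons (by omega)]
    rw [pvILoop, pvJLoop_miss a b c n lo v _ (by rintro j hj k hk ⟨rfl, _, _⟩; omega)]
    dsimp only
    rw [ih (lo + 1) _ (by omega) (by omega)]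
    have hlen : ((PySem.List.pyRange 1 (n + 1) 1).length : Int) = n := by
      rw [PySem.List.length_pyRange_one]; omega
    rw [hlen]
    simp only [Prod.mk.injEq, Option.some.injEq]
    constructor <;> ring

lemma pvILoop_miss (a b c n v : Int) (l : List Int)
    (h : ∀ i ∈ l, ∀ j ∈ PySem.List.pyRange 1 (n + 1) 1,
        ∀ k ∈ PySem.List.pyRange 1 (n + 1) 1, ¬(a = i ∧ b = j ∧ k = c)) :
    (pvILoop a b c n l v).1 = none := by
  induction l generalizing v with
  | nil => simp [pvILoop]
  | cons i is ih =>
    rw [pvILoop, pvJLoop_miss a b c n i v _ (h i List.mem_cons_self)]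
    dsimp only
    exact ih _ (fun x hx => h x (List.mem_cons_of_mem _ hx))

-- ===== VERDICT (by name: the statement is the Claim_ definition above) =====
theorem ijk_to_num_case_spec : Claim_equal_ijk_to_num_case := by
  intro a b c n _
  unfold Spec_ijk_to_num_case ijk_to_num_case ijk_to_num_case_alt
  by_cases h : 1 ≤ a ∧ a ≤ n ∧ 1 ≤ b ∧ b ≤ n ∧ 1 ≤ c ∧ c ≤ n
  · obtain ⟨ha1, ha2, hb1, hb2, hc1, hc2⟩ := h
    rw [pvILoop_hit a b c n ha1 ha2 hb1 hb2 hc1 hc2 (a - 1).toNat 1 1 (by omega) rfl]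
    rw [if_pos ⟨ha1, ha2, hb1, hb2, hc1, hc2⟩]
    simp only [Option.some.injEq]
    ring
  · rw [if_neg h]
    apply pvILoop_miss
    intro i hi j hj k hk
    rw [PySem.List.mem_pyRange_one] at hi hj hk
    rintro ⟨rfl, rfl, rfl⟩
    exact h ⟨by omega, by omega, by omega, by omega, by omega, by omega⟩
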